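-- pv_equiv track=rewrite | github.com/mwiens91/practice-problems | leetcode/2733.neither-minimum-nor-maximum.py | findNonMinOrMax
-- ===== SOURCE A (Python) =====
-- def findNonMinOrMax(nums: list[int]) -> int:
--     max_num = nums[0]
--     min_num = nums[0]
--
--     for num in nums:
--         if min_num < num < max_num:
--             return num
--
--         if num < min_num:
--             if min_num < max_num:
--                 return min_num
--
--             min_num = num
--         elif num > max_num:
--             if min_num < max_num:
--                 return max_num
--
--             max_num = num
--
--     return -1
-- ===== SOURCE B (Python) =====
-- def findNonMinOrMax(nums: list[int]) -> int:
--     # Collect the first three pairwise-distinct values in scan order;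
--     # the answer is their median (sum minus min minus max), or -1.
--     distinct = []
--     for num in nums:
--         if num not in distinct:
--             distinct.append(num)
--             if len(distinct) == 3:
--                 a, b, c = distinct
--                 return a + b + c - min(distinct) - max(distinct)
--     return -1
-- ===== Notes on version B (the rewrite author's own statement) =====
-- stated objective: alternative
-- what changed: Replaces A's single pass with running min/max state and a divergence guard by collecting the first three pairwise-distinct values in scan order and returning their median computed arithmetically (sum minus min minus max), -1 if fewer than three distinct values exist.
import Mathlib
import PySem

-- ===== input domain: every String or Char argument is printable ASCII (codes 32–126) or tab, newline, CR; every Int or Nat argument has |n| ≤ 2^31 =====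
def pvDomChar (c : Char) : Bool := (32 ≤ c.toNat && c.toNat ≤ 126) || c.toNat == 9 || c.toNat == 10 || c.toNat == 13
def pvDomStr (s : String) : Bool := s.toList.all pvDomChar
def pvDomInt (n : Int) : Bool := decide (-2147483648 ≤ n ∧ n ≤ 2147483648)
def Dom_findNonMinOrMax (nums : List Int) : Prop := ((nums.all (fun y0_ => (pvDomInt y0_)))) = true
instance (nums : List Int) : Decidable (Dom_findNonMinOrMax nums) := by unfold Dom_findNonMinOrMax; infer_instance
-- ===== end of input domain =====

-- B replaces A's running-min/max scan by collecting the first three pairwise-distinct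
-- values in scan order and returning their median arithmetically; same O(n) cost.


-- ===== PORT A =====
-- A's single for-loop with running min_num/max_num state.
def findA_loop (mn mx : Int) : List Int → Int
  | [] => -1
  | num :: rest =>
    if mn < num ∧ num < mx then num
    else if num < mn then
      (if mn < mx then mn else findA_loop num mx rest)
    else if num > mx then
      (if mn < mx then mx else findA_loop mn num rest)
    else findA_loop mn mx rest

def findNonMinOrMax (nums : List Int) : Int :=
  match nums with
  | [] => -1   -- Python raises IndexError here (nums[0]); excluded by Pre_
  | first :: _ => findA_loop first first nums

-- ===== PORT B =====
-- B's loop: grow the list of distinct values seen; on reaching three, return their median.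
def findB_go : List Int → List Int → Int
  | _, [] => -1
  | distinct, num :: rest =>
    if num ∈ distinct then findB_go distinct rest
    else
      match distinct ++ [num] with
      | [a, b, c] => a + b + c - min a (min b c) - max a (max b c)
      | d => findB_go d rest

def findNonMinOrMax_alt (nums : List Int) : Int := findB_go [] nums

-- ===== PRECONDITION & SPEC =====
-- A raises IndexError on the empty list (nums[0]); Pre_ excludes exactly that input.
def Pre_findNonMinOrMax (nums : List Int) : Prop := nums ≠ []
instance (nums : List Int) : Decidable (Pre_findNonMinOrMax nums) := by unfold Pre_findNonMinOrMax; infer_instance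
def pvWitness_findNonMinOrMax : List Int := ([2, 1, 3])

def Spec_findNonMinOrMax (nums : List Int) (out : Int) : Prop := out = findNonMinOrMax_alt nums
instance (nums : List Int) (out : Int) : Decidable (Spec_findNonMinOrMax nums out) := by unfold Spec_findNonMinOrMax; infer_instance

-- ===== CLAIM (what is proved, stated in full; the proofs are below) =====
def Claim_equal_findNonMinOrMax : Prop := ∀ (nums : List Int), Dom_findNonMinOrMax nums → Pre_findNonMinOrMax nums → Spec_findNonMinOrMax nums (findNonMinOrMax nums)

-- ===== LEMMAS AND PROOFS =====

-- Once two distinct values a ≠ b are known, A's diverged loop (state min a b, max a b)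
-- coincides with B's loop carrying distinct = [a, b].
theorem loop2_eq (a b : Int) (hab : a ≠ b) :
    ∀ l : List Int, findA_loop (min a b) (max a b) l = findB_go [a, b] l := by
  intro l
  induction l with
  | nil => rfl
  | cons num rest ih =>
    simp only [findA_loop, findB_go, List.mem_cons, List.not_mem_nil, or_false,
      List.cons_append, List.nil_append]
    by_cases hm : num = a ∨ num = b
    · rw [if_pos hm]
      rcases hm with h | h <;> subst h <;>
        rw [if_neg (by omega), if_neg (by omega), if_neg (by omega)] <;> exact ih
    · rw [if_neg hm]
      push Not at hm
      obtain ⟨h1, h2⟩ := hm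
      split_ifs with c1 c2 c3 <;> omega

-- While only one value a has been seen, A skips copies of a; at the first differing
-- element both loops move to the two-distinct state above.
theorem loop1_eq (a : Int) : ∀ l : List Int, findA_loop a a l = findB_go [a] l := by
  intro l
  induction l with
  | nil => rfl
  | cons num rest ih =>
    simp only [findA_loop, findB_go, List.mem_cons, List.not_mem_nil, or_false,
      List.cons_append, List.nil_append]
    by_cases h : num = a
    · subst h
      rw [if_pos rfl, if_neg (by omega), if_neg (by omega), if_neg (by omega)]
      exact ih
    · rw [if_neg h, if_neg (by omega : ¬ (a < num ∧ num < a))]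
      by_cases hlt : num < a
      · rw [if_pos hlt, if_neg (by omega : ¬ a < a)]
        have := loop2_eq a num (by omega) rest
        rwa [min_eq_right (by omega : num ≤ a), max_eq_left (by omega : num ≤ a)] at this
      · rw [if_neg hlt, if_pos (by omega : num > a), if_neg (by omega : ¬ a < a)]
        have := loop2_eq a num (by omega) rest
        rwa [min_eq_left (by omega : a ≤ num), max_eq_right (by omega : a ≤ num)] at this

-- ===== VERDICT (by name: the statement is the Claim_ definition above) =====
theorem findNonMinOrMax_spec : Claim_equal_findNonMinOrMax := by
  intro nums _ hpre
  match nums with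
  | [] => exact absurd rfl hpre
  | first :: rest =>
    show findNonMinOrMax (first :: rest) = findNonMinOrMax_alt (first :: rest)
    simp only [findNonMinOrMax, findNonMinOrMax_alt, findA_loop, findB_go,
      List.not_mem_nil, if_false, List.nil_append]
    rw [if_neg (by omega : ¬ (first < first ∧ first < first)),
      if_neg (by omega : ¬ first < first), if_neg (by omega : ¬ first > first)]
    exact loop1_eq first rest
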